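-- pv_equiv track=rewrite | github.com/adwaitmathkari/Python-Algorithms-Practice | Final Exam/unique_values.py | uniqueValues
-- ===== SOURCE A (Python) =====
-- def uniqueValues(aDict):
--     '''
--     aDict: a dictionary
--     returns: a sorted list of keys that map to unique aDict values, empty list if none
--     '''
--     l=[]
--     for i in aDict.keys():
--         ans= True
--         for j in aDict.keys():
--             if aDict[i]==aDict[j] and i!=j:
--                 ans=ans and False
--         if ans==True:
--             l.append(i)
--     return sorted(l)
-- ===== SOURCE B (Python) =====
-- def uniqueValues(aDict):
--     '''
--     aDict: a dictionary
--     returns: a sorted list of keys that map to unique aDict values, empty list if none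
--     '''
--     groups = {}
--     for k, v in aDict.items():
--         groups.setdefault(v, []).append(k)
--     return sorted(ks[0] for ks in groups.values() if len(ks) == 1)
-- ===== Notes on version B (the rewrite author's own statement) =====
-- stated objective: faster
-- what changed: Replaced A's quadratic nested scan (for every key, rescan all keys for an equal value) by a single pass that groups keys by value in an inverted index and then emits the sole key of each singleton group before sorting.
import Mathlib
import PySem

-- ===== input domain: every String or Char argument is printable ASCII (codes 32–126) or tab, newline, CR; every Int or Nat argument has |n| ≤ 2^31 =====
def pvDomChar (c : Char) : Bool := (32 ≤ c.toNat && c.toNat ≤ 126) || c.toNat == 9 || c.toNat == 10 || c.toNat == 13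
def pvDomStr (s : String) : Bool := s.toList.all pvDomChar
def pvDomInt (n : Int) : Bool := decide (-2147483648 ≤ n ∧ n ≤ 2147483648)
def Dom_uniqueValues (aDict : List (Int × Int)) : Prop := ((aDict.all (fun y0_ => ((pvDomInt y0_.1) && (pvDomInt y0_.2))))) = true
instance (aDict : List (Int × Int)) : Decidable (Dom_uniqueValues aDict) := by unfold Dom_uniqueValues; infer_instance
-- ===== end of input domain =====

-- B replaces A's quadratic per-key rescan by one grouping pass over the items (inverted index value -> keys), then emits singleton groups; sorted output proved identical.

-- ===== PORT A =====
def uniqueValues (aDict : List (Int × Int)) : List Int :=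
  let d := PySem.Dict.ofList aDict
  let l := d.keys.foldl (fun l i =>
      let ans := d.keys.foldl (fun ans j =>
          if d.getD i 0 == d.getD j 0 && i != j then ans && false else ans) true
      if ans = true then l ++ [i] else l) []
  PySem.List.sorted l (fun x => x) false

-- ===== PORT B =====
-- groups.setdefault(v, []).append(k)  ==  groups[v] = groups.get(v, []) + [k], i.e. Dict.modify
def uniqueValues_alt (aDict : List (Int × Int)) : List Int :=
  let d := PySem.Dict.ofList aDict
  let groups := d.items.foldl
      (fun g kv => g.modify kv.2 ([] : List Int) (fun cur => cur ++ [kv.1])) PySem.Dict.empty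
  PySem.List.sorted
    ((groups.values.filter (fun ks => ks.length == 1)).map (fun ks => PySem.List.pyGetD ks 0 0))
    (fun x => x) false

-- ===== PRECONDITION & SPEC =====
def Spec_uniqueValues (aDict : List (Int × Int)) (out : List Int) : Prop := out = uniqueValues_alt aDict
instance (aDict : List (Int × Int)) (out : List Int) : Decidable (Spec_uniqueValues aDict out) := by unfold Spec_uniqueValues; infer_instance

-- ===== CLAIM (what is proved, stated in full; the proofs are below) =====
def Claim_equal_uniqueValues : Prop := ∀ (aDict : List (Int × Int)), Dom_uniqueValues aDict → Spec_uniqueValues aDict (uniqueValues aDict)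

-- ===== LEMMAS AND PROOFS =====

-- the group of keys mapping to value v (proof-only abbreviation)
def pvGrp (d : PySem.Dict Int Int) (v : Int) : List Int :=
  d.keys.filter (fun k => d.getD k 0 == v)

-- A's inner loop: a Bool-and fold
theorem pv_foldl_and (P : Int → Bool) (l : List Int) (b : Bool) :
    l.foldl (fun ans j => if P j = true then ans && false else ans) b
      = (b && l.all (fun j => !P j)) := by
  induction l generalizing b with
  | nil => simp
  | cons a t ih =>
    simp only [List.foldl_cons, List.all_cons]
    by_cases h : P a = true
    · rw [if_pos h, ih]; simp [h]
    · rw [if_neg h, ih]; simp [h]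

-- A's unsorted list is a filter of the keys
theorem pv_A_shape (d : PySem.Dict Int Int) :
    d.keys.foldl (fun l i =>
        let ans := d.keys.foldl (fun ans j =>
            if d.getD i 0 == d.getD j 0 && i != j then ans && false else ans) true
        if ans = true then l ++ [i] else l) []
      = d.keys.filter (fun i => d.keys.all (fun j => !(d.getD i 0 == d.getD j 0 && i != j))) := by
  simp only [pv_foldl_and, Bool.true_and]
  simpa using PySem.List.foldl_append_if
    (fun i => d.keys.all (fun j => !(d.getD i 0 == d.getD j 0 && i != j))) (fun i => i) d.keys []

-- a filter keeping exactly one element of a Nodup list is that singleton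
theorem pv_filter_singleton (l : List Int) (p : Int → Bool) (x : Int)
    (hnd : l.Nodup) (hx : x ∈ l) (hpx : p x = true)
    (h : ∀ k ∈ l, p k = true → k = x) : l.filter p = [x] := by
  induction l with
  | nil => cases hx
  | cons a t ih =>
    rcases List.nodup_cons.mp hnd with ⟨hat, hnt⟩
    by_cases hax : a = x
    · subst hax
      have ht : t.filter p = [] := by
        apply List.filter_eq_nil_iff.mpr
        intro k hk hpk
        exact absurd (h k (List.mem_cons_of_mem _ hk) hpk ▸ hk) hat
      simp [hpx, ht]
    · have hpa : ¬ p a = true := fun hpa => hax (h a List.mem_cons_self hpa)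
      have hxt : x ∈ t := by
        rcases List.mem_cons.mp hx with h' | h'
        · exact absurd h'.symm hax
        · exact h'
      simp only [List.filter_cons, if_neg hpa]
      exact ih hnt hxt (fun k hk hpk => h k (List.mem_cons_of_mem _ hk) hpk)

theorem pv_mem_grp (d : PySem.Dict Int Int) (v x : Int) :
    x ∈ pvGrp d v ↔ x ∈ d.keys ∧ d.getD x 0 = v := by
  simp [pvGrp]

-- the grouping dict B builds: its lookups and its keys
theorem pv_groups_getD (d : PySem.Dict Int Int) (v : Int) :
    (d.items.foldl
        (fun g kv => g.modify kv.2 ([] : List Int) (fun cur => cur ++ [kv.1]))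
        PySem.Dict.empty).getD v []
      = (d.items.filter (fun p => p.2 == v)).map (fun p => p.1) := by
  have := PySem.Dict.getD_foldl_modify_append (d.items.map Prod.swap)
    (PySem.Dict.empty : PySem.Dict Int (List Int)) v
  simpa [List.foldl_map, List.filter_map, List.map_map, Function.comp, Prod.swap] using this

theorem pv_groups_keys (d : PySem.Dict Int Int) :
    (d.items.foldl
        (fun g kv => g.modify kv.2 ([] : List Int) (fun cur => cur ++ [kv.1]))
        PySem.Dict.empty).keys
      = PySem.Set.ofList (d.items.map (fun p => p.2)) := by
  rw [PySem.Dict.keys_foldl_modify_key d.items (fun kv => kv.2) ([] : List Int)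
    (fun _ kv cur => cur ++ [kv.1]) (PySem.Dict.empty : PySem.Dict Int (List Int))]
  rfl

theorem pv_groups_nodup (d : PySem.Dict Int Int) :
    (d.items.foldl
        (fun g kv => g.modify kv.2 ([] : List Int) (fun cur => cur ++ [kv.1]))
        PySem.Dict.empty).keys.Nodup := by
  exact PySem.Dict.nodup_keys_foldl_modify_key d.items (fun kv => kv.2) ([] : List Int)
    (fun _ kv cur => cur ++ [kv.1]) PySem.Dict.empty (by simp [pysem])

-- items of a Nodup-keyed dict, specialised to value lookups
theorem pv_items_filter (d : PySem.Dict Int Int) (hnd : d.keys.Nodup) (v : Int) :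
    (d.items.filter (fun p => p.2 == v)).map (fun p => p.1) = pvGrp d v := by
  rw [PySem.Dict.items_eq_map_keys d hnd 0]
  simp [pvGrp, List.filter_map, List.map_map, Function.comp_def]

theorem pv_items_values (d : PySem.Dict Int Int) (hnd : d.keys.Nodup) :
    d.items.map (fun p => p.2) = d.keys.map (fun k => d.getD k 0) := by
  rw [PySem.Dict.items_eq_map_keys d hnd 0]
  simp [List.map_map, Function.comp]

-- B's grouping dict, read back as the groups of d's keys
theorem pv_B_values (d : PySem.Dict Int Int) (hnd : d.keys.Nodup) :
    (d.items.foldl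
        (fun g kv => g.modify kv.2 ([] : List Int) (fun cur => cur ++ [kv.1]))
        PySem.Dict.empty).values
      = (PySem.Set.ofList (d.keys.map (fun k => d.getD k 0))).map (fun v => pvGrp d v) := by
  rw [PySem.Dict.values_eq_map_keys _ (pv_groups_nodup d) ([] : List Int), pv_groups_keys d,
      pv_items_values d hnd]
  apply List.map_congr_left
  intro v _
  rw [pv_groups_getD d v, pv_items_filter d hnd v]

-- the two unsorted lists are permutations of each other
theorem pv_main (d : PySem.Dict Int Int) (hnd : d.keys.Nodup) :
    (d.keys.filter (fun i => d.keys.all (fun j => !(d.getD i 0 == d.getD j 0 && i != j)))).Perm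
      (((PySem.Set.ofList (d.keys.map (fun k => d.getD k 0))).filter
          (fun v => (pvGrp d v).length == 1)).map (fun v => PySem.List.pyGetD (pvGrp d v) 0 0)) := by
  set pA : Int → Bool := fun i => d.keys.all (fun j => !(d.getD i 0 == d.getD j 0 && i != j)) with hpA
  set S : List Int := PySem.Set.ofList (d.keys.map (fun k => d.getD k 0)) with hS
  set q : Int → Bool := fun v => (pvGrp d v).length == 1 with hq
  -- if q v then grp v is a singleton
  have hsing : ∀ v, q v = true → ∃ y, pvGrp d v = [y] := by
    intro v hv
    exact List.length_eq_one_iff.mp (by simpa [hq] using hv)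
  -- A's predicate characterised through groups
  have hAgrp : ∀ x ∈ d.keys, (pA x = true ↔ pvGrp d (d.getD x 0) = [x]) := by
    intro x hx
    constructor
    · intro hpx
      apply pv_filter_singleton _ _ _ hnd hx (by simp)
      intro k hk hkeq
      have h2 := List.all_eq_true.mp
        (show (d.keys.all fun j => !(d.getD x 0 == d.getD j 0 && x != j)) = true from hpx) k hk
      have hvk : d.getD k 0 = d.getD x 0 := by simpa using hkeq
      simp [hvk] at h2
      exact h2.symm
    · intro hgrp
      simp only [hpA, List.all_eq_true]
      intro j hj
      by_cases hje : d.getD j 0 = d.getD x 0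
      · have hjg : j ∈ pvGrp d (d.getD x 0) := (pv_mem_grp d _ j).mpr ⟨hj, hje⟩
        rw [hgrp] at hjg
        simp at hjg
        simp [hjg]
      · have hne : ¬ d.getD x 0 = d.getD j 0 := fun h => hje h.symm
        simp [hne]
  -- membership equivalence
  apply (List.perm_ext_iff_of_nodup (List.Nodup.filter _ hnd) ?_).mpr
  · intro x
    simp only [List.mem_filter, List.mem_map]
    constructor
    · rintro ⟨hx, hpx⟩
      refine ⟨d.getD x 0, ⟨?_, ?_⟩, ?_⟩
      · simp only [hS, PySem.Set.mem_ofList, List.mem_map]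
        exact ⟨x, hx, rfl⟩
      · simp [hq, (hAgrp x hx).mp hpx]
      · rw [(hAgrp x hx).mp hpx]; rfl
    · rintro ⟨v, ⟨hvS, hqv⟩, hx⟩
      rcases hsing v hqv with ⟨y, hy⟩
      rw [hy] at hx
      have hyx : y = x := by simpa [PySem.List.pyGetD] using hx
      subst hyx
      have hyg : y ∈ pvGrp d v := by rw [hy]; simp
      rcases (pv_mem_grp d v y).mp hyg with ⟨hyk, hyv⟩
      refine ⟨hyk, (hAgrp y hyk).mpr ?_⟩
      rw [hyv, hy]
    -- Nodup of B's list
  · have hSnd : S.Nodup := by simp [hS, pysem]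
    apply List.Nodup.map_on ?_ (List.Nodup.filter _ hSnd)
    intro v1 h1 v2 h2 heq
    rcases hsing v1 (List.mem_filter.mp h1).2 with ⟨y1, hy1⟩
    rcases hsing v2 (List.mem_filter.mp h2).2 with ⟨y2, hy2⟩
    rw [hy1, hy2] at heq
    have hyy : y1 = y2 := by simpa [PySem.List.pyGetD] using heq
    have e1 : d.getD y1 0 = v1 := ((pv_mem_grp d v1 y1).mp (by rw [hy1]; simp)).2
    have e2 : d.getD y2 0 = v2 := ((pv_mem_grp d v2 y2).mp (by rw [hy2]; simp)).2
    rw [← e1, ← e2, hyy]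

-- ===== VERDICT (by name: the statement is the Claim_ definition above) =====
theorem uniqueValues_spec : Claim_equal_uniqueValues := by
  intro aDict _
  unfold Spec_uniqueValues
  simp only [uniqueValues, uniqueValues_alt]
  generalize hg : PySem.Dict.ofList aDict = d
  have hnd : d.keys.Nodup := hg ▸ PySem.Dict.nodup_keys_ofList aDict
  rw [pv_A_shape d, pv_B_values d hnd, List.filter_map, List.map_map]
  exact PySem.List.sorted_eq_sorted_of_perm _ _ _ (fun a b h => h)
    (by simpa [Function.comp] using pv_main d hnd)
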